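-- pv_equiv track=rewrite | github.com/colbertz/stock_agent | test/backtest.py | split_si_content
-- ===== SOURCE A (Python) =====
-- def split_si_content(content):
--     """Split si file content at <UserMessage> into system_prompt and user_message.
--     <UserMessage> line itself belongs to the user_message section.
--     """
--     lines = content.strip().split('\n')
--     system_lines = []
--     user_lines = []
--     user_message_started = False
--     for line in lines:
--         if line.startswith('<UserMessage>'):
--             user_message_started = True
--         if user_message_started:
--             user_lines.append(line)
--         else:
--             system_lines.append(line)
--     return "\n".join(system_lines).strip(), "\n".join(user_lines).strip()
-- ===== SOURCE B (Python) =====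
-- def split_si_content(content):
--     """Split si file content at <UserMessage> into system_prompt and user_message.
--     <UserMessage> line itself belongs to the user_message section.
--     """
--     lines = content.strip().split('\n')
--     idx = next((i for i, line in enumerate(lines)
--                 if line.startswith('<UserMessage>')), len(lines))
--     return "\n".join(lines[:idx]).strip(), "\n".join(lines[idx:]).strip()
-- ===== Notes on version B (the rewrite author's own statement) =====
-- stated objective: simpler
-- what changed: Replaces the boolean-flag per-line routing loop with locate-the-first-marker-line-then-slice: find the index of the first line starting with '<UserMessage>' and split the line list by slicing.
import Mathlib
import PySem

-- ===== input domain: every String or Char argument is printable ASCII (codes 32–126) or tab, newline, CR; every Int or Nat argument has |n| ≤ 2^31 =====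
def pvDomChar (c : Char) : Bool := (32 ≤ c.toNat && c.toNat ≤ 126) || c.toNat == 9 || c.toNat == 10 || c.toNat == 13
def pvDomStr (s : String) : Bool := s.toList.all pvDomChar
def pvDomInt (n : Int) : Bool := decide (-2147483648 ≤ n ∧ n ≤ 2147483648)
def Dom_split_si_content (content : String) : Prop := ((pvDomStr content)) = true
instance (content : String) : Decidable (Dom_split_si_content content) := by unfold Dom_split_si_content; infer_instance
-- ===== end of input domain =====

-- B replaces A's boolean-flag per-line routing loop with find-first-marker-index-then-slice (simpler decomposition).

-- ===== PORT A =====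
-- the body of A's for-loop, as a fold step over (system_lines, user_lines, user_message_started)
def pvStepA (acc : List String × List String × Bool) (line : String) : List String × List String × Bool :=
  let started := acc.2.2 || PySem.Str.startswith line "<UserMessage>"
  if started then (acc.1, acc.2.1 ++ [line], started)
  else (acc.1 ++ [line], acc.2.1, started)

def split_si_content (content : String) : String × String :=
  -- split? is none only for an empty separator, so getD [] never fires for "\n"
  let lines := (PySem.Str.split? (PySem.Str.strip content) "\n").getD []
  let st := lines.foldl pvStepA ([], [], false)
  (PySem.Str.strip (PySem.Str.join "\n" st.1), PySem.Str.strip (PySem.Str.join "\n" st.2.1))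

-- ===== PORT B =====
def split_si_content_alt (content : String) : String × String :=
  let lines := (PySem.Str.split? (PySem.Str.strip content) "\n").getD []
  let idx := (lines.findIdx? (fun line => PySem.Str.startswith line "<UserMessage>")).getD lines.length
  (PySem.Str.strip (PySem.Str.join "\n" (lines.take idx)),
   PySem.Str.strip (PySem.Str.join "\n" (lines.drop idx)))

-- ===== PRECONDITION & SPEC =====
def Spec_split_si_content (content : String) (out : String × String) : Prop := out = split_si_content_alt content
instance (content : String) (out : String × String) : Decidable (Spec_split_si_content content out) := by unfold Spec_split_si_content; infer_instance

-- ===== CLAIM (what is proved, stated in full; the proofs are below) =====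
def Claim_equal_split_si_content : Prop := ∀ (content : String), Dom_split_si_content content → Spec_split_si_content content (split_si_content content)

-- ===== LEMMAS AND PROOFS =====

theorem stepA_started (sys usr : List String) (l : String) :
    pvStepA (sys, usr, true) l = (sys, usr ++ [l], true) := by
  unfold pvStepA; simp

theorem stepA_pos (sys usr : List String) (l : String) (h : PySem.Str.startswith l "<UserMessage>" = true) :
    pvStepA (sys, usr, false) l = (sys, usr ++ [l], true) := by
  unfold pvStepA; rw [h]; simp

theorem stepA_neg (sys usr : List String) (l : String) (h : PySem.Str.startswith l "<UserMessage>" = false) :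
    pvStepA (sys, usr, false) l = (sys ++ [l], usr, false) := by
  unfold pvStepA; rw [h]; simp

theorem foldTrue (lines : List String) (sys usr : List String) :
    lines.foldl pvStepA (sys, usr, true) = (sys, usr ++ lines, true) := by
  induction lines generalizing usr with
  | nil => simp
  | cons l ls ih => rw [List.foldl_cons, stepA_started, ih]; simp

theorem foldMain (lines : List String) (sys : List String) :
    lines.foldl pvStepA (sys, [], false) =
      (sys ++ lines.take ((lines.findIdx? (fun line => PySem.Str.startswith line "<UserMessage>")).getD lines.length),
       lines.drop ((lines.findIdx? (fun line => PySem.Str.startswith line "<UserMessage>")).getD lines.length),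
       lines.any (fun line => PySem.Str.startswith line "<UserMessage>")) := by
  induction lines generalizing sys with
  | nil => simp
  | cons l ls ih =>
    cases h : PySem.Str.startswith l "<UserMessage>" with
    | true =>
      rw [List.foldl_cons, stepA_pos _ _ _ h, foldTrue]
      simp only [List.findIdx?_cons, h, List.any_cons]
      simp
    | false =>
      rw [List.foldl_cons, stepA_neg _ _ _ h, ih]
      simp only [List.findIdx?_cons, h, List.any_cons, Bool.false_or, if_neg Bool.false_ne_true]
      cases hfi : ls.findIdx? (fun line => PySem.Str.startswith line "<UserMessage>") with
      | none => simp
      | some i => simp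

-- ===== VERDICT (by name: the statement is the Claim_ definition above) =====
theorem split_si_content_spec : Claim_equal_split_si_content := by
  intro content _
  show _ = _
  unfold split_si_content split_si_content_alt
  simp only []
  rw [foldMain]
  simp
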